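-- pv_equiv track=rewrite | github.com/maksiplus19/crypto | source/part3.py | poly_mul
-- ===== SOURCE A (Python) =====
-- def poly_mul(a: int, b: int) -> int:
--     """Напишите функцию, умножения двух двоичных многочленов; умножения,двух элементов из GF(256)."""
--     if max(a.bit_length(), b.bit_length()) > 8:
--         raise ValueError(f'{a.bit_length()=} {b.bit_length()=}')
--     p = 0
--     while a and b:
--         if b & 1:
--             p ^= a
--
--         if a >= 128:
--             a = ((a << 1) ^ 0x11b) & 0b11111111
--         else:
--             a <<= 1
--         b >>= 1
--     return p & 0b11111111
-- ===== SOURCE B (Python) =====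
-- def poly_mul(a: int, b: int) -> int:
--     """GF(256) multiply: carry-less product first, then reduce mod 0x11b."""
--     if max(a.bit_length(), b.bit_length()) > 8:
--         raise ValueError(f'{a.bit_length()=} {b.bit_length()=}')
--     prod = 0
--     for i in range(8):
--         if (b >> i) & 1:
--             prod ^= a << i
--     for pos in range(14, 7, -1):
--         if (prod >> pos) & 1:
--             prod ^= 0x11b << (pos - 8)
--     return prod & 0xFF
-- ===== Notes on version B (the rewrite author's own statement) =====
-- stated objective: alternative
-- what changed: A interleaves shift-reduce of a with scanning bits of b in one Russian-peasant while-loop; B splits the work into two fixed-count phases: build the full 15-bit carry-less product, then reduce it modulo 0x11b by descending bit position.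
-- outside the precondition, e.g. on poly_mul(-1, 1): A returns 255, B returns 26; on poly_mul(3, -1): A does not finish within the time limit, B returns 26
import Mathlib
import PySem

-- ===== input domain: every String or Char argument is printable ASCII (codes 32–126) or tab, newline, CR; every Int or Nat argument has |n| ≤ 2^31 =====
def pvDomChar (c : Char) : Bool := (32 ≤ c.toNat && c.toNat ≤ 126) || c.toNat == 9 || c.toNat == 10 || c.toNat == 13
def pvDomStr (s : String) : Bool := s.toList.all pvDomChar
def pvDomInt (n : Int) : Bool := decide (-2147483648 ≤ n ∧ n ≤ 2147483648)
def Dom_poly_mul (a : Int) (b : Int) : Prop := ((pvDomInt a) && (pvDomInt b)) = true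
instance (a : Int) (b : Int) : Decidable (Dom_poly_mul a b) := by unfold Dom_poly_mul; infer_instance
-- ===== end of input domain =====

-- B replaces A's interleaved shift-reduce loop by two fixed phases (carry-less product, then modular reduction by descending bit); proved equal on the natural byte domain 0..255.


-- ===== PORT A =====
-- A's while-loop, fuel-bounded (33 steps cover every terminating run admitted by Pre_; on b < 0 Python diverges, excluded by Pre_)
def polyMulLoop : Nat → Int → Int → Int → Int
  | 0, _, _, p => p
  | fuel + 1, a, b, p =>
    if a ≠ 0 ∧ b ≠ 0 then
      let p' := if PySem.Int.band b 1 ≠ 0 then PySem.Int.bxor p a else p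
      let a' := if a ≥ 128 then PySem.Int.band (PySem.Int.bxor (a <<< (1 : Nat)) 0x11b) 0xff else a <<< (1 : Nat)
      polyMulLoop fuel a' (b >>> (1 : Nat)) p'
    else p

def poly_mul (a : Int) (b : Int) : Int :=
  if max (PySem.Int.bitLength a) (PySem.Int.bitLength b) > 8 then 0  -- Python raises ValueError here (outside Pre_)
  else PySem.Int.band (polyMulLoop 33 a b 0) 0xff

-- ===== PORT B =====
def poly_mul_alt (a : Int) (b : Int) : Int :=
  if max (PySem.Int.bitLength a) (PySem.Int.bitLength b) > 8 then 0  -- Python raises ValueError here (outside Pre_)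
  else
    PySem.Int.band
      ((PySem.List.pyRange 14 7 (-1)).foldl
        (fun (prod : Int) pos => if PySem.Int.band (prod >>> pos.toNat) 1 ≠ 0 then PySem.Int.bxor prod ((0x11b : Int) <<< (pos.toNat - 8)) else prod)
        ((PySem.List.pyRange 0 8 1).foldl
          (fun (prod : Int) i => if PySem.Int.band (b >>> i.toNat) 1 ≠ 0 then PySem.Int.bxor prod (a <<< i.toNat) else prod) 0))
      0xff

-- ===== PRECONDITION & SPEC =====
-- Pre_ restricts to the natural GF(256) byte domain 0..255: on negative b the Python A loops forever, and on
-- negative a the value A returns is an accident of the never-taken reduction branch (a >= 128); beyond 8 bits A raises ValueError.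
def Pre_poly_mul (a : Int) (b : Int) : Prop := 0 ≤ a ∧ a ≤ 255 ∧ 0 ≤ b ∧ b ≤ 255
instance (a : Int) (b : Int) : Decidable (Pre_poly_mul a b) := by unfold Pre_poly_mul; infer_instance
def pvWitness_poly_mul : Int × Int := (83, 202)

def Spec_poly_mul (a : Int) (b : Int) (out : Int) : Prop := out = poly_mul_alt a b
instance (a : Int) (b : Int) (out : Int) : Decidable (Spec_poly_mul a b out) := by unfold Spec_poly_mul; infer_instance

-- ===== CLAIM (what is proved, stated in full; the proofs are below) =====
def Claim_equal_poly_mul : Prop := ∀ (a : Int) (b : Int), Dom_poly_mul a b → Pre_poly_mul a b → Spec_poly_mul a b (poly_mul a b)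

-- ===== LEMMAS AND PROOFS =====

-- Nat mirrors of the two ports (proof-internal)
def pvXt (a : Nat) : Nat := if 128 ≤ a then ((a <<< 1) ^^^ 0x11b) &&& 0xff else a <<< 1

def pvXtIter : Nat → Nat → Nat
  | 0, a => a
  | i + 1, a => pvXtIter i (pvXt a)

def pvS : Nat → Nat → Nat → Nat
  | 0, _, _ => 0
  | f + 1, a, b => (if b &&& 1 ≠ 0 then a else 0) ^^^ pvS f (pvXt a) (b >>> 1)

def pvLoop : Nat → Nat → Nat → Nat → Nat
  | 0, _, _, p => p
  | f + 1, a, b, p =>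
    if a ≠ 0 ∧ b ≠ 0 then pvLoop f (pvXt a) (b >>> 1) (if b &&& 1 ≠ 0 then p ^^^ a else p) else p

def pvC (a b : Nat) : Nat :=
  (List.range 8).foldl (fun p i => if (b >>> i) &&& 1 ≠ 0 then p ^^^ (a <<< i) else p) 0

def pvRed (p pos : Nat) : Nat := if (p >>> pos) &&& 1 ≠ 0 then p ^^^ (0x11b <<< (pos - 8)) else p

def pvR (p : Nat) : Nat := [14, 13, 12, 11, 10, 9, 8].foldl pvRed p

def pvNatA (a b : Nat) : Nat := pvLoop 33 a b 0 &&& 0xff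

def pvNatB (a b : Nat) : Nat := pvR (pvC a b) &&& 0xff

def pvXorL (l : List Nat) : Nat := l.foldr (· ^^^ ·) 0

-- ---- bridges: the Int ports compute the casts of the Nat mirrors ----
theorem pv_shiftL_cast (m k : Nat) : ((m : Int) <<< k) = ((m <<< k : Nat) : Int) := by exact_mod_cast rfl
theorem pv_shiftR_cast (m k : Nat) : ((m : Int) >>> k) = ((m >>> k : Nat) : Int) := by exact_mod_cast rfl
theorem pv_shiftL_castI (m k : Nat) : ((m : Int) <<< ((k : Nat) : Int)) = ((m <<< k : Nat) : Int) := by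
  rw [Int.shiftLeft_natCast_right]; exact pv_shiftL_cast m k
theorem pv_shiftR_castI (m k : Nat) : ((m : Int) >>> ((k : Nat) : Int)) = ((m >>> k : Nat) : Int) := by
  rw [Int.shiftRight_natCast_right]; exact pv_shiftR_cast m k
theorem pv_band_cast (m n : Nat) : PySem.Int.band (m : Int) (n : Int) = ((m &&& n : Nat) : Int) :=
  PySem.Int.band_natCast m n
theorem pv_bxor_cast (m n : Nat) : PySem.Int.bxor (m : Int) (n : Int) = ((m ^^^ n : Nat) : Int) :=
  PySem.Int.bxor_natCast m n

def pvCastL (l : List Nat) : List Int := l.map (fun k => (k : Int))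
theorem pvCastL_cons (i : Nat) (l : List Nat) : pvCastL (i :: l) = (i : Int) :: pvCastL l := rfl

theorem pv_bridge_loop (f : Nat) : ∀ (a b p : Nat),
    polyMulLoop f (a : Int) (b : Int) (p : Int) = ((pvLoop f a b p : Nat) : Int) := by
  induction f with
  | zero => intro a b p; rfl
  | succ f ih =>
    intro a b p
    show (if (a : Int) ≠ 0 ∧ (b : Int) ≠ 0 then _ else _) = _
    by_cases h : a ≠ 0 ∧ b ≠ 0
    · have h' : (a : Int) ≠ 0 ∧ (b : Int) ≠ 0 := by exact_mod_cast h
      rw [if_pos h']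
      show polyMulLoop f _ _ _ = _
      unfold pvLoop
      rw [if_pos h]
      have hc : PySem.Int.band (b : Int) 1 = ((b &&& 1 : Nat) : Int) := by exact_mod_cast pv_band_cast b 1
      have hcond : (PySem.Int.band (b : Int) 1 ≠ 0) ↔ (b &&& 1 ≠ 0) := by rw [hc]; exact_mod_cast Iff.rfl
      have hge : ((a : Int) ≥ 128) ↔ (128 ≤ a) := by exact_mod_cast Iff.rfl
      have hxt : (if (a : Int) ≥ 128 then PySem.Int.band (PySem.Int.bxor ((a : Int) <<< (1 : Nat)) 0x11b) 0xff
            else (a : Int) <<< (1 : Nat)) = ((pvXt a : Nat) : Int) := by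
        unfold pvXt
        by_cases hg : 128 ≤ a
        · rw [if_pos (hge.mpr hg), if_pos hg, pv_shiftL_cast]
          exact_mod_cast rfl
        · rw [if_neg (fun hh => hg (hge.mp hh)), if_neg hg, pv_shiftL_cast]
      have hp' : (if PySem.Int.band (b : Int) 1 ≠ 0 then PySem.Int.bxor (p : Int) (a : Int) else (p : Int))
          = (((if b &&& 1 ≠ 0 then p ^^^ a else p) : Nat) : Int) := by
        by_cases hb1 : b &&& 1 ≠ 0
        · rw [if_pos (hcond.mpr hb1), if_pos hb1, pv_bxor_cast]
        · rw [if_neg (fun hh => hb1 (hcond.mp hh)), if_neg hb1]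
      rw [hxt, hp', pv_shiftR_cast]
      exact ih (pvXt a) (b >>> 1) (if b &&& 1 ≠ 0 then p ^^^ a else p)
    · have h' : ¬ ((a : Int) ≠ 0 ∧ (b : Int) ≠ 0) := by
        intro hh; exact h ⟨by exact_mod_cast hh.1, by exact_mod_cast hh.2⟩
      rw [if_neg h']
      unfold pvLoop
      rw [if_neg h]

theorem pv_bl_le (n : Int) (h0 : 0 ≤ n) (h : n ≤ 255) : PySem.Int.bitLength n ≤ 8 := by
  by_cases hn : n = 0
  · subst hn; simp [PySem.Int.bitLength_zero]
  · by_contra hgt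
    have h1 := PySem.Int.two_pow_bitLength_le n hn
    have h2 : (2 : Nat) ^ 8 ≤ 2 ^ (PySem.Int.bitLength n - 1) :=
      Nat.pow_le_pow_right (by norm_num) (by omega)
    have h3 : 256 ≤ n.natAbs := le_trans h2 h1
    omega

theorem pv_guard_neg (a b : Int) (ha0 : 0 ≤ a) (ha1 : a ≤ 255) (hb0 : 0 ≤ b) (hb1 : b ≤ 255) :
    ¬ max (PySem.Int.bitLength a) (PySem.Int.bitLength b) > 8 := by
  have h1 := pv_bl_le a ha0 ha1
  have h2 := pv_bl_le b hb0 hb1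
  omega

theorem pv_bridge_A (m n : Nat) (hm : m ≤ 255) (hn : n ≤ 255) :
    poly_mul (m : Int) (n : Int) = ((pvNatA m n : Nat) : Int) := by
  unfold poly_mul pvNatA
  rw [if_neg (pv_guard_neg _ _ (by positivity) (by exact_mod_cast hm) (by positivity) (by exact_mod_cast hn))]
  have h0 : (0 : Int) = ((0 : Nat) : Int) := rfl
  rw [h0, pv_bridge_loop]
  exact_mod_cast pv_band_cast (pvLoop 33 m n 0) 0xff

theorem pv_fold1_bridge (b a : Nat) (l : List Nat) : ∀ (P : Nat),
    (pvCastL l).foldl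
      (fun (prod : Int) i => if PySem.Int.band ((b : Int) >>> i.toNat) 1 ≠ 0 then PySem.Int.bxor prod ((a : Int) <<< i.toNat) else prod) (P : Int)
    = ((l.foldl (fun p i => if (b >>> i) &&& 1 ≠ 0 then p ^^^ (a <<< i) else p) P : Nat) : Int) := by
  induction l with
  | nil => intro P; rfl
  | cons i l ih =>
    intro P
    rw [pvCastL_cons]
    simp only [List.foldl_cons, Int.toNat_natCast]
    have hc : PySem.Int.band ((b : Int) >>> ((i : Nat) : Int)) 1 = (((b >>> i) &&& 1 : Nat) : Int) := by
      rw [pv_shiftR_castI]; exact_mod_cast pv_band_cast (b >>> i) 1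
    have hcond : (PySem.Int.band ((b : Int) >>> ((i : Nat) : Int)) 1 ≠ 0) ↔ ((b >>> i) &&& 1 ≠ 0) := by
      rw [hc]; exact_mod_cast Iff.rfl
    by_cases hb1 : (b >>> i) &&& 1 ≠ 0
    · rw [if_pos (hcond.mpr hb1), if_pos hb1, pv_shiftL_castI, pv_bxor_cast]
      exact ih (P ^^^ (a <<< i))
    · rw [if_neg (fun hh => hb1 (hcond.mp hh)), if_neg hb1]
      exact ih P

theorem pv_fold2_bridge (l : List Nat) (h8 : ∀ x ∈ l, 8 ≤ x) : ∀ (P : Nat),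
    (pvCastL l).foldl
      (fun (prod : Int) pos => if PySem.Int.band (prod >>> pos.toNat) 1 ≠ 0 then PySem.Int.bxor prod ((0x11b : Int) <<< (pos.toNat - 8)) else prod) (P : Int)
    = ((l.foldl pvRed P : Nat) : Int) := by
  induction l with
  | nil => intro P; rfl
  | cons t l ih =>
    intro P
    rw [pvCastL_cons]
    simp only [List.foldl_cons, Int.toNat_natCast]
    have ht8 : 8 ≤ t := h8 t (by simp)
    have hsub : ((t : Int) - 8) = (((t - 8 : Nat)) : Int) := by omega
    have hc : PySem.Int.band ((P : Int) >>> ((t : Nat) : Int)) 1 = (((P >>> t) &&& 1 : Nat) : Int) := by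
      rw [pv_shiftR_castI]; exact_mod_cast pv_band_cast (P >>> t) 1
    have hcond : (PySem.Int.band ((P : Int) >>> ((t : Nat) : Int)) 1 ≠ 0) ↔ ((P >>> t) &&& 1 ≠ 0) := by
      rw [hc]; exact_mod_cast Iff.rfl
    have hsh : ((0x11b : Int) <<< (((t - 8 : Nat)) : Int)) = (((0x11b <<< (t - 8) : Nat)) : Int) := by
      exact_mod_cast pv_shiftL_castI 0x11b (t - 8)
    have hstep : (if PySem.Int.band ((P : Int) >>> ((t : Nat) : Int)) 1 ≠ 0 then PySem.Int.bxor (P : Int) ((0x11b : Int) <<< ((t : Int) - 8)) else (P : Int))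
        = ((pvRed P t : Nat) : Int) := by
      unfold pvRed
      by_cases hb1 : (P >>> t) &&& 1 ≠ 0
      · rw [if_pos (hcond.mpr hb1), if_pos hb1, hsub, hsh, pv_bxor_cast]
      · rw [if_neg (fun hh => hb1 (hcond.mp hh)), if_neg hb1]
    rw [hstep]
    exact ih (fun x hx => h8 x (by simp [hx])) (pvRed P t)

theorem pv_bridge_B (m n : Nat) (hm : m ≤ 255) (hn : n ≤ 255) :
    poly_mul_alt (m : Int) (n : Int) = ((pvNatB m n : Nat) : Int) := by
  unfold poly_mul_alt pvNatB pvC pvR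
  rw [if_neg (pv_guard_neg _ _ (by positivity) (by exact_mod_cast hm) (by positivity) (by exact_mod_cast hn))]
  have hr1 : PySem.List.pyRange 0 8 1 = pvCastL [0, 1, 2, 3, 4, 5, 6, 7] := by decide
  have hr2 : PySem.List.pyRange 14 7 (-1) = pvCastL [14, 13, 12, 11, 10, 9, 8] := by decide
  have hrange : List.range 8 = [0, 1, 2, 3, 4, 5, 6, 7] := by decide
  rw [hr1, hr2, hrange]
  have e1 : (pvCastL [0, 1, 2, 3, 4, 5, 6, 7]).foldl
      (fun (prod : Int) i => if PySem.Int.band ((n : Int) >>> i.toNat) 1 ≠ 0 then PySem.Int.bxor prod ((m : Int) <<< i.toNat) else prod) (0 : Int)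
      = ((([0, 1, 2, 3, 4, 5, 6, 7] : List Nat).foldl (fun p i => if (n >>> i) &&& 1 ≠ 0 then p ^^^ (m <<< i) else p) 0 : Nat) : Int) := by
    have h := pv_fold1_bridge n m [0, 1, 2, 3, 4, 5, 6, 7] 0
    simpa using h
  rw [e1, pv_fold2_bridge [14, 13, 12, 11, 10, 9, 8] (by decide)]
  exact_mod_cast pv_band_cast _ 0xff

-- ---- Nat-level equivalence ----
theorem pvS_b0 (f : Nat) : ∀ a, pvS f a 0 = 0 := by
  induction f with
  | zero => intro a; rfl
  | succ f ih => intro a; show (if (0 : Nat) &&& 1 ≠ 0 then a else 0) ^^^ pvS f (pvXt a) (0 >>> 1) = 0; simp [ih]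

theorem pvS_a0 (f : Nat) : ∀ b, pvS f 0 b = 0 := by
  induction f with
  | zero => intro b; rfl
  | succ f ih =>
    intro b
    show (if b &&& 1 ≠ 0 then (0 : Nat) else 0) ^^^ pvS f (pvXt 0) (b >>> 1) = 0
    have h : pvXt 0 = 0 := by decide
    rw [h, ih]
    simp

theorem pv_loop_eq (f : Nat) : ∀ a b p, pvLoop f a b p = p ^^^ pvS f a b := by
  induction f with
  | zero => intro a b p; show p = p ^^^ 0; simp
  | succ f ih =>
    intro a b p
    show (if a ≠ 0 ∧ b ≠ 0 then _ else _) = _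
    by_cases h : a ≠ 0 ∧ b ≠ 0
    · rw [if_pos h]
      rw [ih]
      show (if b &&& 1 ≠ 0 then p ^^^ a else p) ^^^ pvS f (pvXt a) (b >>> 1)
          = p ^^^ ((if b &&& 1 ≠ 0 then a else 0) ^^^ pvS f (pvXt a) (b >>> 1))
      by_cases hb1 : b &&& 1 ≠ 0
      · rw [if_pos hb1, if_pos hb1, Nat.xor_assoc]
      · rw [if_neg hb1, if_neg hb1]; simp
    · rw [if_neg h]
      rcases Decidable.not_and_iff_not_or_not.mp h with ha | hb
      · have ha0 : a = 0 := by omega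
        subst ha0; rw [pvS_a0]; simp
      · have hb0 : b = 0 := by omega
        subst hb0; rw [pvS_b0]; simp

theorem pvS_shrink (n : Nat) : ∀ f a b, n ≤ f → b < 2 ^ n → pvS f a b = pvS n a b := by
  induction n with
  | zero =>
    intro f a b _ hb
    have hb0 : b = 0 := by simpa using hb
    subst hb0
    rw [pvS_b0, pvS_b0]
  | succ n ih =>
    intro f a b hf hb
    cases f with
    | zero => omega
    | succ f =>
      show (if b &&& 1 ≠ 0 then a else 0) ^^^ pvS f (pvXt a) (b >>> 1)
          = (if b &&& 1 ≠ 0 then a else 0) ^^^ pvS n (pvXt a) (b >>> 1)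
      congr 1
      apply ih f (pvXt a) (b >>> 1) (by omega)
      have : b >>> 1 = b / 2 := by simp [Nat.shiftRight_eq_div_pow]
      rw [this]
      have : (2 : Nat) ^ (n + 1) = 2 ^ n * 2 := by ring
      omega

theorem pv_ite_xor (c : Prop) [Decidable c] (p v : Nat) :
    (if c then p ^^^ v else p) = p ^^^ (if c then v else 0) := by
  split <;> simp

theorem pv_foldl_xor {α : Type} (g : α → Nat) (l : List α) : ∀ (P : Nat),
    l.foldl (fun p i => p ^^^ g i) P = P ^^^ pvXorL (l.map g) := by
  induction l with
  | nil => intro P; simp [pvXorL]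
  | cons i l ih =>
    intro P
    simp only [List.foldl_cons, List.map_cons]
    rw [ih]
    show (P ^^^ g i) ^^^ pvXorL (l.map g) = P ^^^ pvXorL (g i :: l.map g)
    have : pvXorL (g i :: l.map g) = g i ^^^ pvXorL (l.map g) := rfl
    rw [this, Nat.xor_assoc]

theorem pvS_as_list (n : Nat) : ∀ a b,
    pvS n a b = pvXorL ((List.range n).map (fun i => if (b >>> i) &&& 1 ≠ 0 then pvXtIter i a else 0)) := by
  induction n with
  | zero => intro a b; rfl
  | succ n ih =>
    intro a b
    rw [List.range_succ_eq_map]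
    simp only [List.map_cons, List.map_map]
    show (if b &&& 1 ≠ 0 then a else 0) ^^^ pvS n (pvXt a) (b >>> 1)
        = pvXorL ((if (b >>> 0) &&& 1 ≠ 0 then pvXtIter 0 a else 0) :: _)
    rw [ih (pvXt a) (b >>> 1)]
    have hhead : (if (b >>> 0) &&& 1 ≠ 0 then pvXtIter 0 a else 0) = (if b &&& 1 ≠ 0 then a else 0) := by
      rfl
    have htail : (List.range n).map ((fun i => if (b >>> i) &&& 1 ≠ 0 then pvXtIter i a else 0) ∘ Nat.succ)
        = (List.range n).map (fun i => if ((b >>> 1) >>> i) &&& 1 ≠ 0 then pvXtIter i (pvXt a) else 0) := by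
      apply List.map_congr_left
      intro i _
      have h1 : (b >>> 1) >>> i = b >>> (Nat.succ i) := by
        rw [← Nat.shiftRight_add]
        congr 1
        omega
      have h2 : pvXtIter (Nat.succ i) a = pvXtIter i (pvXt a) := rfl
      simp only [Function.comp, h1, h2]
    rw [htail]
    rfl

theorem pv_cond_testBit (x t : Nat) : ((x >>> t) &&& 1 ≠ 0) ↔ x.testBit t := by
  simp [Nat.testBit]

theorem pv_red_linear (p q t : Nat) : pvRed (p ^^^ q) t = pvRed p t ^^^ pvRed q t := by
  unfold pvRed
  by_cases hp : p.testBit t <;> by_cases hq : q.testBit t <;>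
    simp only [pv_cond_testBit, Nat.testBit_xor, hp, hq, Bool.xor_true, Bool.xor_false,
      Bool.not_true, Bool.not_false, if_true] <;>
    simp [Nat.xor_assoc, Nat.xor_comm, Nat.xor_left_comm]

theorem pv_foldl_red_linear (l : List Nat) : ∀ p q,
    l.foldl pvRed (p ^^^ q) = l.foldl pvRed p ^^^ l.foldl pvRed q := by
  induction l with
  | nil => intro p q; rfl
  | cons t l ih =>
    intro p q
    simp only [List.foldl_cons]
    rw [pv_red_linear, ih]

theorem pvR_linear (p q : Nat) : pvR (p ^^^ q) = pvR p ^^^ pvR q :=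
  pv_foldl_red_linear _ p q

theorem pvR_zero : pvR 0 = 0 := by decide

theorem pvR_fold (b a : Nat) (l : List Nat) : ∀ (P : Nat),
    pvR (l.foldl (fun p i => if (b >>> i) &&& 1 ≠ 0 then p ^^^ (a <<< i) else p) P)
    = l.foldl (fun p i => if (b >>> i) &&& 1 ≠ 0 then p ^^^ pvR (a <<< i) else p) (pvR P) := by
  induction l with
  | nil => intro P; rfl
  | cons i l ih =>
    intro P
    simp only [List.foldl_cons]
    rw [ih]
    congr 1
    by_cases hc : (b >>> i) &&& 1 ≠ 0
    · rw [if_pos hc, if_pos hc, pvR_linear]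
    · rw [if_neg hc, if_neg hc]

set_option maxRecDepth 100000 in
set_option maxHeartbeats 1000000 in
theorem pv_key : ∀ (x : Fin 256) (i : Fin 8), pvR (x.val <<< i.val) = pvXtIter i.val x.val := by
  decide

theorem pv_nat_eq (m n : Nat) (hm : m ≤ 255) (hn : n ≤ 255) : pvNatA m n = pvNatB m n := by
  unfold pvNatA pvNatB
  congr 1
  rw [pv_loop_eq, Nat.zero_xor, pvS_shrink 8 33 m n (by omega) (by omega), pvS_as_list]
  unfold pvC
  rw [pvR_fold, pvR_zero]
  simp only [pv_ite_xor]
  rw [pv_foldl_xor, Nat.zero_xor]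
  congr 1
  apply List.map_congr_left
  intro i hi
  have hi8 : i < 8 := List.mem_range.mp hi
  by_cases hc : (n >>> i) &&& 1 ≠ 0
  · rw [if_pos hc, if_pos hc]
    exact (pv_key ⟨m, by omega⟩ ⟨i, hi8⟩).symm
  · rw [if_neg hc, if_neg hc]

-- ===== VERDICT (by name: the statement is the Claim_ definition above) =====
theorem poly_mul_spec : Claim_equal_poly_mul := by
  intro a b _ hpre
  obtain ⟨ha0, ha1, hb0, hb1⟩ := hpre
  have hx : a = ((a.toNat : Nat) : Int) := (Int.toNat_of_nonneg ha0).symm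
  have hy : b = ((b.toNat : Nat) : Int) := (Int.toNat_of_nonneg hb0).symm
  unfold Spec_poly_mul
  rw [hx, hy]
  rw [pv_bridge_A a.toNat b.toNat (by omega) (by omega), pv_bridge_B a.toNat b.toNat (by omega) (by omega)]
  exact_mod_cast pv_nat_eq a.toNat b.toNat (by omega) (by omega)
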